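-- pv_equiv track=rewrite | github.com/interactive-robotics/Personal_AJShah | spot_puns/puns/Progression.py | get_all_truth_assignments
-- ===== SOURCE A (Python) =====
-- from itertools import product
--
-- def get_all_truth_assignments(vocabulary):
--     n_propositions = len(vocabulary)
--     propositions = sorted(list(vocabulary))
--     All_assignments = []
--
--     possible_truth_assignments = list(product(*([True, False],)*n_propositions))
--     for val in possible_truth_assignments:
--         temp_assignment = {}
--         for (key,value) in zip(propositions, val):
--             temp_assignment[key] = value
--         All_assignments.append(temp_assignment)
--
--     return All_assignments
-- ===== SOURCE B (Python) =====
-- def get_all_truth_assignments(vocabulary):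
--     result = [{}]
--     for prop in sorted(vocabulary):
--         result = [{**a, prop: v} for a in result for v in (True, False)]
--     return result
-- ===== Notes on version B (the rewrite author's own statement) =====
-- stated objective: simpler
-- what changed: Replaces the itertools.product tuple enumeration plus per-tuple dict-building zip loop by a single incremental fold that doubles a list of partial assignments per proposition.
import Mathlib
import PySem

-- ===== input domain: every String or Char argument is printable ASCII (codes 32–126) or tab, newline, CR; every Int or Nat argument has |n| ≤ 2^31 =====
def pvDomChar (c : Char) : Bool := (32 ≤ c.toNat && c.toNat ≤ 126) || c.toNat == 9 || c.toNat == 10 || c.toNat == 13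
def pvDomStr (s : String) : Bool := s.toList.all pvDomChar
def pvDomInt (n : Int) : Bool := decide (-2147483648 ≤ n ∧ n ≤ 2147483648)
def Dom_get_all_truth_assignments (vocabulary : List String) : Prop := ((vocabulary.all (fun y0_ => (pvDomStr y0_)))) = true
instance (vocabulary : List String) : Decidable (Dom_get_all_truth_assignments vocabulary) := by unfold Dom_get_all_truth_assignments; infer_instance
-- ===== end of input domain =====

-- B replaces the product-of-tuples enumeration by an incremental doubling fold; objective: simpler.

-- ===== PORT A =====
-- itertools.product(*([True, False],)*n), transliterated: first factor varies slowest.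
def pvProd : Nat → List (List Bool)
  | 0 => [[]]
  | n + 1 => [true, false].flatMap (fun v => (pvProd n).map (fun t => v :: t))

def get_all_truth_assignments (vocabulary : List String) : List (List (String × Bool)) :=
  let n_propositions := vocabulary.length
  let propositions := PySem.List.sorted vocabulary (fun x => x) false
  let possible_truth_assignments := pvProd n_propositions
  possible_truth_assignments.foldl
    (fun All_assignments val =>
      All_assignments ++
        [((List.zip propositions val).foldl
            (fun d kv => d.insert kv.1 kv.2) PySem.Dict.empty).items])
    []

-- ===== PORT B =====
def get_all_truth_assignments_alt (vocabulary : List String) : List (List (String × Bool)) :=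
  ((PySem.List.sorted vocabulary (fun x => x) false).foldl
      (fun result p => result.flatMap (fun a => [a.insert p true, a.insert p false]))
      [PySem.Dict.empty]).map (fun d => d.items)

-- ===== PRECONDITION & SPEC =====
def Spec_get_all_truth_assignments (vocabulary : List String) (out : List (List (String × Bool))) : Prop := out = get_all_truth_assignments_alt vocabulary
instance (vocabulary : List String) (out : List (List (String × Bool))) : Decidable (Spec_get_all_truth_assignments vocabulary out) := by unfold Spec_get_all_truth_assignments; infer_instance

-- ===== CLAIM (what is proved, stated in full; the proofs are below) =====
def Claim_equal_get_all_truth_assignments : Prop := ∀ (vocabulary : List String), Dom_get_all_truth_assignments vocabulary → Spec_get_all_truth_assignments vocabulary (get_all_truth_assignments vocabulary)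

-- ===== LEMMAS AND PROOFS =====

-- A's append-accumulating outer loop is a map over the tuple list.
theorem pv_foldl_append_map {α β : Type} (f : α → β) :
    ∀ (l : List α) (acc : List β),
      l.foldl (fun acc val => acc ++ [f val]) acc = acc ++ l.map f := by
  intro l
  induction l with
  | nil => simp
  | cons x xs ih => intro acc; simp [List.foldl, ih]

-- B's doubling step distributes over an appended accumulator list.
theorem pv_step_append (ps : List String) :
    ∀ (l1 l2 : List (PySem.Dict String Bool)),
      List.foldl
          (fun result p => result.flatMap (fun a => [a.insert p true, a.insert p false]))
          (l1 ++ l2) ps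
        = List.foldl
            (fun result p => result.flatMap (fun a => [a.insert p true, a.insert p false])) l1 ps
          ++ List.foldl
              (fun result p => result.flatMap (fun a => [a.insert p true, a.insert p false])) l2 ps := by
  induction ps with
  | nil => intro l1 l2; simp
  | cons p ps ih =>
      intro l1 l2
      simp only [List.foldl_cons, List.flatMap_append]
      exact ih _ _

-- Each B fold from a single seed dict equals A's per-tuple dict construction.
theorem pv_fold_single (ps : List String) :
    ∀ (d : PySem.Dict String Bool),
      List.foldl
          (fun result p => result.flatMap (fun a => [a.insert p true, a.insert p false])) [d] ps
        = (pvProd ps.length).map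
            (fun t => (List.zip ps t).foldl (fun d kv => d.insert kv.1 kv.2) d) := by
  induction ps with
  | nil => intro d; simp [pvProd]
  | cons p ps ih =>
      intro d
      simp only [List.foldl_cons, List.flatMap_cons, List.flatMap_nil, List.append_nil]
      rw [show ([d.insert p true, d.insert p false] : List (PySem.Dict String Bool))
            = [d.insert p true] ++ [d.insert p false] from rfl,
          pv_step_append, ih, ih]
      conv_rhs => rw [List.length_cons, pvProd]
      simp only [List.flatMap_cons, List.flatMap_nil, List.append_nil, List.map_append,
        List.map_map]
      rfl

theorem get_all_truth_assignments_eq (vocabulary : List String) :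
    get_all_truth_assignments vocabulary = get_all_truth_assignments_alt vocabulary := by
  unfold get_all_truth_assignments get_all_truth_assignments_alt
  rw [pv_foldl_append_map, pv_fold_single, List.nil_append, List.map_map,
    PySem.List.length_sorted]
  rfl

-- ===== VERDICT (by name: the statement is the Claim_ definition above) =====
theorem get_all_truth_assignments_spec : Claim_equal_get_all_truth_assignments := by
  intro vocabulary _
  exact get_all_truth_assignments_eq vocabulary
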